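-- pv_equiv track=rewrite | github.com/ChrisBernitsas/tracking-bot | extra scripts/recompute_levels.py | calculate_bedwars_level
-- ===== SOURCE A (Python) =====
-- def calculate_bedwars_level(experience: int) -> int:
--     """
--     Calculates Bedwars level based on the official Hypixel formula.
--     See: https://hypixel.net/threads/bed-wars-prestige-guide.702408/
--     """
--     xp = int(experience)
--
--     # XP required for each prestige (100 levels)
--     # 4 levels at reduced cost: 500 + 1000 + 2000 + 3500 = 7000
--     # 96 levels at normal cost: 96 * 5000 = 480000
--     xp_for_prestige = 487000
--
--     prestiges = xp // xp_for_prestige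
--     level = prestiges * 100
--
--     remaining_xp = xp % xp_for_prestige
--
--     # XP costs for the first 4 levels of any prestige
--     costs = [500, 1000, 2000, 3500]
--
--     levels_in_prestige = 0
--     for cost in costs:
--         if remaining_xp >= cost:
--             remaining_xp -= cost
--             levels_in_prestige += 1
--         else:
--             break
--
--     # For levels 5 and beyond in the current prestige
--     levels_from_normal_xp = remaining_xp // 5000
--     levels_in_prestige += levels_from_normal_xp
--
--     level += levels_in_prestige
--
--     return level
-- ===== SOURCE B (Python) =====
-- def calculate_bedwars_level(experience: int) -> int:
--     xp = int(experience)
--     prestiges, remaining_xp = divmod(xp, 487000)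
--     thresholds = [500, 1500, 3500, 7000]
--     levels_in_prestige = sum(remaining_xp >= t for t in thresholds)
--     if levels_in_prestige == 4:
--         levels_in_prestige += (remaining_xp - 7000) // 5000
--     return prestiges * 100 + levels_in_prestige
-- ===== Notes on version B (the rewrite author's own statement) =====
-- stated objective: simpler
-- what changed: Replaced the subtract-and-break loop over per-level costs by counting how many precomputed cumulative thresholds remaining_xp has reached, adding the normal-cost tail division only when all four early levels are cleared.
import Mathlib
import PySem

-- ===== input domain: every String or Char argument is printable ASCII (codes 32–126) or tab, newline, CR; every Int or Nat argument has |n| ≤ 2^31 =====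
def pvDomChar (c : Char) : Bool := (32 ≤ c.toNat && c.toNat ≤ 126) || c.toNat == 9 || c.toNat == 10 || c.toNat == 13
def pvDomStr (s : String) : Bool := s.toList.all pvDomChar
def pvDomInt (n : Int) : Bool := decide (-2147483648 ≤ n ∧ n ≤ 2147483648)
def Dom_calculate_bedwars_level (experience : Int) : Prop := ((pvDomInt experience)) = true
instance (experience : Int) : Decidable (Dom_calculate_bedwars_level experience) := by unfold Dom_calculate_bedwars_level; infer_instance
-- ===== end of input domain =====

-- B replaces A's subtract-and-break loop by counting cumulative thresholds plus a conditional tail; same values, different decomposition (objective: simpler).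

-- ===== PORT A =====
-- the for-loop over costs with its break: returns (remaining_xp, levels_in_prestige)
def pvALoop : List Int → Int → Int → Int × Int
  | [], rem, lv => (rem, lv)
  | c :: cs, rem, lv => if rem ≥ c then pvALoop cs (rem - c) (lv + 1) else (rem, lv)

def calculate_bedwars_level (experience : Int) : Int :=
  let xp := experience
  let xp_for_prestige : Int := 487000
  let prestiges := PySem.Int.floordiv xp xp_for_prestige
  let level := prestiges * 100
  let remaining_xp := PySem.Int.mod xp xp_for_prestige
  let costs : List Int := [500, 1000, 2000, 3500]
  let st := pvALoop costs remaining_xp 0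
  let levels_from_normal_xp := PySem.Int.floordiv st.1 5000
  let levels_in_prestige := st.2 + levels_from_normal_xp
  level + levels_in_prestige

-- ===== PORT B =====
def calculate_bedwars_level_alt (experience : Int) : Int :=
  let xp := experience
  let prestiges := PySem.Int.floordiv xp 487000
  let remaining_xp := PySem.Int.mod xp 487000
  let thresholds : List Int := [500, 1500, 3500, 7000]
  let levels := (thresholds.map (fun t => if remaining_xp ≥ t then (1 : Int) else 0)).sum
  let levels := if levels = 4 then levels + PySem.Int.floordiv (remaining_xp - 7000) 5000 else levels
  prestiges * 100 + levels

-- ===== PRECONDITION & SPEC =====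
def Spec_calculate_bedwars_level (experience : Int) (out : Int) : Prop := out = calculate_bedwars_level_alt experience
instance (experience : Int) (out : Int) : Decidable (Spec_calculate_bedwars_level experience out) := by unfold Spec_calculate_bedwars_level; infer_instance

-- ===== CLAIM (what is proved, stated in full; the proofs are below) =====
def Claim_equal_calculate_bedwars_level : Prop := ∀ (experience : Int), Dom_calculate_bedwars_level experience → Spec_calculate_bedwars_level experience (calculate_bedwars_level experience)

-- ===== LEMMAS AND PROOFS =====
theorem pvFdiv5000 (a : Int) : PySem.Int.floordiv a 5000 = a / 5000 :=
  PySem.Int.floordiv_eq_ediv_of_pos (by norm_num)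

-- ===== VERDICT (by name: the statement is the Claim_ definition above) =====
theorem calculate_bedwars_level_spec : Claim_equal_calculate_bedwars_level := by
  intro experience _
  unfold Spec_calculate_bedwars_level calculate_bedwars_level calculate_bedwars_level_alt
  have h0 : 0 ≤ PySem.Int.mod experience 487000 := PySem.Int.mod_nonneg _ (by norm_num)
  have h1 : PySem.Int.mod experience 487000 < 487000 := PySem.Int.mod_lt _ (by norm_num)
  simp only [pvALoop, pvFdiv5000, List.map, List.sum_cons, List.sum_nil]
  generalize PySem.Int.mod experience 487000 = r at h0 h1
  split_ifs <;> omega
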